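-- pv_equiv track=rewrite | github.com/TheSolyboy/openclaw-voice | tts.py | chunk_sentences_for_tts
-- ===== SOURCE A (Python) =====
-- MAX_CHUNK_SENTENCES = 2
--
-- MAX_CHUNK_CHARS = 120
--
-- def chunk_sentences_for_tts(sentences: list[str]) -> list[str]:
--     """Group short adjacent sentences to reduce dead air between clips."""
--     chunks = []
--     current_chunk = []
--
--     for sentence in sentences:
--         cleaned = sentence.strip()
--         if not cleaned:
--             continue
--
--         candidate = " ".join(current_chunk + [cleaned]).strip()
--         if current_chunk and (
--             len(current_chunk) >= MAX_CHUNK_SENTENCES or len(candidate) > MAX_CHUNK_CHARS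
--         ):
--             chunks.append(" ".join(current_chunk))
--             current_chunk = [cleaned]
--         else:
--             current_chunk.append(cleaned)
--
--     if current_chunk:
--         chunks.append(" ".join(current_chunk))
--
--     return chunks
-- ===== SOURCE B (Python) =====
-- MAX_CHUNK_SENTENCES = 2
--
-- MAX_CHUNK_CHARS = 120
--
-- def chunk_sentences_for_tts(sentences: list[str]) -> list[str]:
--     """Group short adjacent sentences to reduce dead air between clips."""
--     cleaned = [s.strip() for s in sentences if s.strip()]
--     chunks = []
--     i = 0
--     while i < len(cleaned):
--         if i + 1 < len(cleaned) and len(cleaned[i]) + 1 + len(cleaned[i + 1]) <= MAX_CHUNK_CHARS: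
--             chunks.append(cleaned[i] + " " + cleaned[i + 1])
--             i += 2
--         else:
--             chunks.append(cleaned[i])
--             i += 1
--     return chunks
-- ===== Notes on version B (the rewrite author's own statement) =====
-- stated objective: alternative
-- what changed: Replaces A's stateful current-chunk accumulator with a two-pass form: first strip-and-filter the sentences, then a single index walk that merges each sentence with its successor when the space-joined pair fits in 120 chars (valid because the chunk-size bound is 2).
import Mathlib
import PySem

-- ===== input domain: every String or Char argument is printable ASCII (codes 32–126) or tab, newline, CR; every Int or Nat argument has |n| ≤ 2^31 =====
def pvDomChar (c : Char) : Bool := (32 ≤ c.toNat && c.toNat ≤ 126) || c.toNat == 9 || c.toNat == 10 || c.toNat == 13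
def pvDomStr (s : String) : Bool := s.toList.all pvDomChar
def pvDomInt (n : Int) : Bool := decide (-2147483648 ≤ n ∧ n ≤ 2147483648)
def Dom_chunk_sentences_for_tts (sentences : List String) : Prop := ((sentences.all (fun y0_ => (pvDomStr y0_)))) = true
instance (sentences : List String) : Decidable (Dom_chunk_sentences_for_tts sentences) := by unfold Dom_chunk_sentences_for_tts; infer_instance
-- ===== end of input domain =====

-- B replaces A's stateful current-chunk accumulator with a strip-and-filter pass followed by
-- an explicit pair-merging walk (valid because the chunk-size bound is 2); alternative decomposition, same cost.


-- ===== PORT A =====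
-- one iteration of A's for-loop; state = (chunks, current_chunk)
def ttsStep (st : List String × List String) (sentence : String) : List String × List String :=
  let cleaned := PySem.Str.strip sentence
  if cleaned = "" then st
  else
    let candidate := PySem.Str.strip (PySem.Str.join " " (st.2 ++ [cleaned]))
    if st.2 ≠ [] ∧ (2 ≤ (st.2.length : Int) ∨ 120 < PySem.Str.len candidate) then
      (st.1 ++ [PySem.Str.join " " st.2], [cleaned])
    else
      (st.1, st.2 ++ [cleaned])

def chunk_sentences_for_tts (sentences : List String) : List String :=
  let st := sentences.foldl ttsStep ([], [])
  if st.2 ≠ [] then st.1 ++ [PySem.Str.join " " st.2] else st.1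

-- ===== PORT B =====
-- B's while-loop over the cleaned list as structural recursion (i advances by 2 on a merge, else by 1)
def ttsPair : List String → List String
  | [] => []
  | [a] => [a]
  | a :: b :: rest =>
    if PySem.Str.len a + 1 + PySem.Str.len b ≤ 120 then
      (a ++ " " ++ b) :: ttsPair rest
    else
      a :: ttsPair (b :: rest)

def chunk_sentences_for_tts_alt (sentences : List String) : List String :=
  ttsPair ((sentences.map PySem.Str.strip).filter (fun s => s ≠ ""))

-- ===== PRECONDITION & SPEC =====
def Spec_chunk_sentences_for_tts (sentences : List String) (out : List String) : Prop := out = chunk_sentences_for_tts_alt sentences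
instance (sentences : List String) (out : List String) : Decidable (Spec_chunk_sentences_for_tts sentences out) := by unfold Spec_chunk_sentences_for_tts; infer_instance

-- ===== CLAIM (what is proved, stated in full; the proofs are below) =====
def Claim_equal_chunk_sentences_for_tts : Prop := ∀ (sentences : List String), Dom_chunk_sentences_for_tts sentences → Spec_chunk_sentences_for_tts sentences (chunk_sentences_for_tts sentences)

-- ===== LEMMAS AND PROOFS =====

-- a "nice" char list: nonempty, no whitespace at either end (what .strip() produces when nonempty)
def NiceCs (l : List Char) : Prop :=
  l ≠ [] ∧ (∀ c ∈ l.head?, PySem.Chars.isspace c = false) ∧ (∀ c ∈ l.getLast?, PySem.Chars.isspace c = false)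

def NiceS (s : String) : Prop := NiceCs s.toList

theorem nice_strip (l : List Char) (h : PySem.Chars.strip l ≠ []) : NiceCs (PySem.Chars.strip l) := by
  have hpre : PySem.Chars.strip l <+: PySem.Chars.lstrip l := by
    have := List.reverse_prefix.mpr (List.dropWhile_suffix (l := (PySem.Chars.lstrip l).reverse) PySem.Chars.isspace)
    simpa [PySem.Chars.strip, PySem.Chars.rstrip] using this
  refine ⟨h, ?_, ?_⟩
  · intro c hc
    obtain ⟨t, ht⟩ := hpre
    have hd : (l.dropWhile PySem.Chars.isspace).head? = some c := by
      have h2 : (PySem.Chars.lstrip l).head? = some c := by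
        rw [← ht, List.head?_append]
        rw [Option.mem_def] at hc
        rw [hc]; rfl
      simpa [PySem.Chars.lstrip] using h2
    have hne : l.dropWhile PySem.Chars.isspace ≠ [] := by
      intro h0; rw [h0] at hd; simp at hd
    have hfail := List.head_dropWhile_not PySem.Chars.isspace (l := l) hne
    rw [List.head?_eq_some_head hne, Option.some_inj] at hd
    rw [← hd]; exact hfail
  · intro c hc
    have hrepr : PySem.Chars.strip l = ((PySem.Chars.lstrip l).reverse.dropWhile PySem.Chars.isspace).reverse := rfl
    rw [hrepr, List.getLast?_reverse] at hc
    have hne : (PySem.Chars.lstrip l).reverse.dropWhile PySem.Chars.isspace ≠ [] := by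
      intro h0; apply h; rw [hrepr, h0]; rfl
    have hfail := List.head_dropWhile_not PySem.Chars.isspace (l := (PySem.Chars.lstrip l).reverse) hne
    rw [List.head?_eq_some_head hne, Option.mem_def, Option.some_inj] at hc
    rw [← hc]; exact hfail

theorem nice_append (a c : List Char) (ha : NiceCs a) (hc : NiceCs c) : NiceCs (a ++ ' ' :: c) := by
  obtain ⟨hane, ha1, -⟩ := ha
  obtain ⟨hcne, -, hc2⟩ := hc
  refine ⟨by simp, ?_, ?_⟩
  · intro ch hch
    rw [List.head?_append] at hch
    cases hh : a.head? with
    | none => exact absurd (List.head?_eq_none_iff.mp hh) hane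
    | some x =>
      apply ha1
      rw [hh] at hch ⊢
      simpa using hch
  · intro ch hch
    apply hc2
    rw [show a ++ ' ' :: c = (a ++ [' ']) ++ c by simp] at hch
    rwa [List.getLast?_append_of_ne_nil _ hcne] at hch

theorem join_singleton_str (a : String) : PySem.Str.join " " [a] = a := by
  apply String.toList_inj.mp
  simp [PySem.Str.join, PySem.Chars.join]
  rw [List.intercalate]
  simp

theorem join_pair_str (a b : String) : PySem.Str.join " " [a, b] = a ++ " " ++ b := by
  apply String.toList_inj.mp
  simp [PySem.Str.join, PySem.Chars.join, List.intercalate, List.intersperse]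

theorem dropWhile_eq_self_of_head (l : List Char) (h : ∀ c ∈ l.head?, PySem.Chars.isspace c = false) :
    l.dropWhile PySem.Chars.isspace = l := by
  cases l with
  | nil => rfl
  | cons c t => simp [h c (by simp)]

theorem strip_of_nice (l : List Char) (h : NiceCs l) : PySem.Chars.strip l = l := by
  obtain ⟨-, h1, h2⟩ := h
  unfold PySem.Chars.strip PySem.Chars.lstrip PySem.Chars.rstrip
  rw [dropWhile_eq_self_of_head l h1, dropWhile_eq_self_of_head _ (by simpa [List.head?_reverse] using h2),
      List.reverse_reverse]

theorem toList_append3 (a b : String) : (a ++ " " ++ b).toList = a.toList ++ ' ' :: b.toList := by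
  simp

theorem niceS_ne_empty (s : String) (h : NiceS s) : s ≠ "" := by
  intro h0
  exact h.1 (by simp [h0])

theorem strip_join_pair (a b : String) (ha : NiceS a) (hb : NiceS b) :
    PySem.Str.strip (PySem.Str.join " " [a, b]) = a ++ " " ++ b := by
  rw [join_pair_str]
  apply String.toList_inj.mp
  rw [PySem.Str.toList_strip, toList_append3]
  exact strip_of_nice _ (nice_append _ _ ha hb)

theorem strip_single (a : String) (ha : NiceS a) : PySem.Str.strip a = a := by
  apply String.toList_inj.mp
  rw [PySem.Str.toList_strip]
  exact strip_of_nice _ ha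

theorem len_append3 (a b : String) : PySem.Str.len (a ++ " " ++ b) = PySem.Str.len a + 1 + PySem.Str.len b := by
  simp [PySem.Str.len]
  omega

theorem nice_of_clean (s : String) (h : PySem.Str.strip s ≠ "") : NiceS (PySem.Str.strip s) := by
  unfold NiceS
  rw [PySem.Str.toList_strip]
  apply nice_strip
  intro h0
  apply h
  apply String.toList_inj.mp
  rw [PySem.Str.toList_strip, h0]
  rfl

theorem ttsStep_skip (st : List String × List String) (s : String) (h : PySem.Str.strip s = "") :
    ttsStep st s = st := by
  simp [ttsStep, h]

theorem ttsStep_first (chunks : List String) (c : String) (hc : NiceS c) :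
    ttsStep (chunks, []) c = (chunks, [c]) := by
  simp [ttsStep, strip_single _ hc, niceS_ne_empty _ hc]

theorem ttsStep_one (chunks : List String) (a c : String) (ha : NiceS a) (hc : NiceS c) :
    ttsStep (chunks, [a]) c =
      if 120 < PySem.Str.len a + 1 + PySem.Str.len c then (chunks ++ [a], [c])
      else (chunks, [a, c]) := by
  simp only [ttsStep, strip_single _ hc]
  rw [if_neg (niceS_ne_empty _ hc)]
  simp only [List.cons_append, List.nil_append, strip_join_pair a c ha hc, len_append3]
  by_cases h120 : 120 < PySem.Str.len a + 1 + PySem.Str.len c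
  · rw [if_pos ⟨by simp, Or.inr h120⟩, if_pos h120, join_singleton_str]
  · rw [if_neg, if_neg h120]
    rintro ⟨-, h2 | h2⟩
    · simp at h2
    · exact h120 h2

theorem ttsStep_two (chunks : List String) (a b c : String) (hc : NiceS c) :
    ttsStep (chunks, [a, b]) c = (chunks ++ [PySem.Str.join " " [a, b]], [c]) := by
  simp only [ttsStep, strip_single _ hc]
  rw [if_neg (niceS_ne_empty _ hc), if_pos ⟨by simp, Or.inl (by simp)⟩]

def flushA (st : List String × List String) : List String :=
  if st.2 ≠ [] then st.1 ++ [PySem.Str.join " " st.2] else st.1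

-- fold over raw sentences = fold over the cleaned (stripped, nonempty) list
theorem fold_clean (sentences : List String) (st : List String × List String) :
    sentences.foldl ttsStep st =
      ((sentences.map PySem.Str.strip).filter (fun s => s ≠ "")).foldl ttsStep st := by
  induction sentences generalizing st with
  | nil => rfl
  | cons s rest ih =>
    by_cases h : PySem.Str.strip s = ""
    · simp only [List.foldl_cons, List.map_cons, List.filter_cons]
      rw [if_neg (by simp [h]), ttsStep_skip st s h, ih]
    · simp only [List.foldl_cons, List.map_cons, List.filter_cons]
      rw [if_pos (by simp [h]), List.foldl_cons, ih,
        show ttsStep st s = ttsStep st (PySem.Str.strip s) by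
          simp only [ttsStep, strip_single _ (nice_of_clean s h)]]

-- the two-state invariant: from cur=[a] the fold produces ttsPair (a :: l); from cur=[a,b] it flushes "a b" first
theorem main_invariant (n : Nat) : ∀ (l : List String) (chunks : List String) (a : String),
    l.length ≤ n → (∀ x ∈ l, NiceS x) → NiceS a →
    (flushA (l.foldl ttsStep (chunks, [a])) = chunks ++ ttsPair (a :: l)) ∧
    (∀ b, NiceS b → flushA (l.foldl ttsStep (chunks, [a, b])) =
        chunks ++ (PySem.Str.join " " [a, b]) :: ttsPair l) := by
  induction n with
  | zero =>
    intro l chunks a hl _ _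
    have : l = [] := List.length_eq_zero_iff.mp (Nat.le_zero.mp hl)
    subst this
    exact ⟨by simp [flushA, ttsPair, join_singleton_str], fun b _ => by simp [flushA, ttsPair]⟩
  | succ n ih =>
    intro l chunks a hl hml ha
    cases l with
    | nil =>
      exact ⟨by simp [flushA, ttsPair, join_singleton_str], fun b _ => by simp [flushA, ttsPair]⟩
    | cons c rest =>
      have hc : NiceS c := hml c (by simp)
      have hrest : ∀ x ∈ rest, NiceS x := fun x hx => hml x (by simp [hx])
      have hlen : rest.length ≤ n := by simpa using hl
      constructor
      · rw [List.foldl_cons, ttsStep_one chunks a c ha hc]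
        by_cases h120 : 120 < PySem.Str.len a + 1 + PySem.Str.len c
        · rw [if_pos h120]
          rw [(ih rest (chunks ++ [a]) c hlen hrest hc).1]
          rw [show ttsPair (a :: c :: rest) = a :: ttsPair (c :: rest) by
            rw [ttsPair]; rw [if_neg (by omega)]]
          simp
        · rw [if_neg h120]
          rw [(ih rest chunks a hlen hrest ha).2 c hc]
          rw [show ttsPair (a :: c :: rest) = (a ++ " " ++ c) :: ttsPair rest by
            rw [ttsPair]; rw [if_pos (by omega)]]
          rw [join_pair_str]
      · intro b hb
        rw [List.foldl_cons, ttsStep_two chunks a b c hc]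
        rw [(ih rest (chunks ++ [PySem.Str.join " " [a, b]]) c hlen hrest hc).1]
        simp

theorem a_eq_b (sentences : List String) :
    chunk_sentences_for_tts sentences = chunk_sentences_for_tts_alt sentences := by
  unfold chunk_sentences_for_tts chunk_sentences_for_tts_alt
  rw [show (let st := sentences.foldl ttsStep ([], []);
      if st.2 ≠ [] then st.1 ++ [PySem.Str.join " " st.2] else st.1) =
      flushA (sentences.foldl ttsStep ([], [])) from rfl]
  rw [fold_clean]
  generalize hg : (sentences.map PySem.Str.strip).filter (fun s => s ≠ "") = cl
  have hnice : ∀ x ∈ cl, NiceS x := by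
    rw [← hg]
    intro x hx
    simp only [List.mem_filter, List.mem_map] at hx
    obtain ⟨⟨s, -, rfl⟩, hne⟩ := hx
    exact nice_of_clean s (by simpa using hne)
  cases cl with
  | nil => rfl
  | cons a rest =>
    have ha : NiceS a := hnice a (List.mem_cons_self ..)
    rw [List.foldl_cons, ttsStep_first [] a ha]
    exact (main_invariant rest.length rest [] a le_rfl
      (fun x hx => hnice x (List.mem_cons_of_mem _ hx)) ha).1

-- ===== VERDICT (by name: the statement is the Claim_ definition above) =====
theorem chunk_sentences_for_tts_spec : Claim_equal_chunk_sentences_for_tts := by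
  intro sentences _
  unfold Spec_chunk_sentences_for_tts
  exact a_eq_b sentences
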